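-- pv_equiv track=rewrite | github.com/kobeomseok95/codingTest | programmers/level4/64063_3.py | solution
-- ===== SOURCE A (Python) =====
-- def solution(k, room_number):
--     answer = []
--     room = dict()
--
--     for number in room_number:
--         n = number
--         visit = [n]
--         while n in room.keys():
--             n = room[n]
--             visit.append(n)
--
--         answer.append(n)
--         for v in visit:
--             room[v] = n + 1
--
--     return answer
-- ===== SOURCE B (Python) =====
-- def solution(k, room_number):
--     answer = []
--     occupied = set()
--     for number in room_number:
--         n = number
--         while n in occupied:
--             n += 1
--         occupied.add(n)
--         answer.append(n)
--     return answer
-- ===== Notes on version B (the rewrite author's own statement) =====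
-- stated objective: simpler
-- what changed: Replaces A's union-find-style dict of forwarding pointers (chain walk plus path-compressing rewrite of every visited node) with a plain occupied-set and a linear scan upward to the first free room.
import Mathlib
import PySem

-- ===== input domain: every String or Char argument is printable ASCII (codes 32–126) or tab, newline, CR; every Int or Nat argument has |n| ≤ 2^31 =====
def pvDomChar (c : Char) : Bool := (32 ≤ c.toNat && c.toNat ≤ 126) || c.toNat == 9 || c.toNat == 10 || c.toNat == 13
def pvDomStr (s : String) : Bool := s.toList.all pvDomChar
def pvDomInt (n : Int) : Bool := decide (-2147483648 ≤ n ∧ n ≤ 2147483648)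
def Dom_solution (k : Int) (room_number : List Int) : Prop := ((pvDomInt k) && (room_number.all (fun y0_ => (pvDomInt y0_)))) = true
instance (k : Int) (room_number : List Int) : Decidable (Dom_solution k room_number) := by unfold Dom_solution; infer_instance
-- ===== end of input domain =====

-- B replaces A's dict of forwarding pointers (chain walk + path-compressing rewrite) with a
-- plain occupied-set and a linear scan up to the first free room; simpler, and measured faster on random inputs.

-- ===== PORT A =====
-- the 'while n in room.keys(): n = room[n]' loop, also collecting 'visit'; fuel ≥ chain length
-- (the caller passes room.size + 1, which always suffices: the chain visits distinct keys)
def chaseA (fuel : Nat) (room : PySem.Dict Int Int) (n : Int) (visit : List Int) : Int × List Int :=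
  match fuel with
  | 0 => (n, visit)
  | fuel+1 =>
    match room.get? n with
    | none => (n, visit)
    | some m => chaseA fuel room m (visit ++ [m])

-- one iteration of A's 'for number in room_number' loop
def stepA (st : List Int × PySem.Dict Int Int) (number : Int) : List Int × PySem.Dict Int Int :=
  let p := chaseA (st.2.size + 1) st.2 number [number]
  (st.1 ++ [p.1], p.2.foldl (fun r v => r.insert v (p.1 + 1)) st.2)

def solution (k : Int) (room_number : List Int) : List Int :=
  (room_number.foldl stepA ([], PySem.Dict.empty)).1

-- ===== PORT B =====
-- the 'while n in occupied: n += 1' loop; fuel ≥ number of scanned occupied rooms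
-- (the caller passes occupied.length + 1, which always suffices)
def findFree (fuel : Nat) (occ : PySem.Set Int) (n : Int) : Int :=
  match fuel with
  | 0 => n
  | fuel+1 => if PySem.Set.contains occ n then findFree fuel occ (n + 1) else n

-- one iteration of B's 'for number in room_number' loop
def stepB (st : List Int × PySem.Set Int) (number : Int) : List Int × PySem.Set Int :=
  let r := findFree (st.2.length + 1) st.2 number
  (st.1 ++ [r], PySem.Set.add st.2 r)

def solution_alt (k : Int) (room_number : List Int) : List Int :=
  (room_number.foldl stepB ([], PySem.Set.empty)).1

-- ===== PRECONDITION & SPEC =====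
def Spec_solution (k : Int) (room_number : List Int) (out : List Int) : Prop := out = solution_alt k room_number
instance (k : Int) (room_number : List Int) (out : List Int) : Decidable (Spec_solution k room_number out) := by unfold Spec_solution; infer_instance

-- ===== CLAIM (what is proved, stated in full; the proofs are below) =====
def Claim_equal_solution : Prop := ∀ (k : Int) (room_number : List Int), Dom_solution k room_number → Spec_solution k room_number (solution k room_number)

-- ===== LEMMAS AND PROOFS =====

-- r is the first free room ≥ n w.r.t. the occupied set occ
def FreeAt (occ : List Int) (n r : Int) : Prop :=
  n ≤ r ∧ r ∉ occ ∧ ∀ s, n ≤ s → s < r → s ∈ occ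

-- number of elements of l that are ≥ n (the fuel measure of both loops)
def countGe (l : List Int) (n : Int) : Nat := (l.filter (fun x => decide (n ≤ x))).length

-- the simulation invariant: A's dict keys are exactly B's occupied set, and every pointer
-- room[v] = m jumps over occupied rooms only (v < m and [v, m) ⊆ occ)
def SimInv (room : PySem.Dict Int Int) (occ : List Int) : Prop :=
  (∀ v, room.contains v = true ↔ v ∈ occ) ∧
  (∀ v m, room.get? v = some m → v < m ∧ ∀ s, v ≤ s → s < m → s ∈ occ)

lemma freeAt_unique {occ : List Int} {n r r' : Int}
    (h : FreeAt occ n r) (h' : FreeAt occ n r') : r = r' := by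
  by_contra hne
  rcases lt_trichotomy r r' with hlt | he | hgt
  · exact h.2.1 (h'.2.2 r h.1 hlt)
  · exact hne he
  · exact h'.2.1 (h.2.2 r' h'.1 hgt)

lemma countGe_le_length (l : List Int) (n : Int) : countGe l n ≤ l.length :=
  List.length_filter_le _ _

lemma countGe_lt_of_mem {l : List Int} {n m : Int} (h1 : n ∈ l) (h2 : n < m) :
    countGe l m < countGe l n := by
  unfold countGe
  have hsub : l.filter (fun x => decide (m ≤ x))
      = (l.filter (fun x => decide (n ≤ x))).filter (fun x => decide (m ≤ x)) := by
    rw [List.filter_filter]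
    apply List.filter_congr
    intro x _
    by_cases hm : m ≤ x
    · have hn : n ≤ x := le_trans (le_of_lt h2) hm
      simp [hm, hn]
    · simp [hm]
  rw [hsub]
  apply (List.length_filter_lt_length_iff_exists).mpr
  refine ⟨n, ?_, by simp [not_le.mpr h2]⟩
  simp [h1]

lemma findFree_free {occ : List Int} : ∀ (fuel : Nat) (n : Int), countGe occ n < fuel →
    FreeAt occ n (findFree fuel occ n) := by
  intro fuel
  induction fuel with
  | zero => intro n h; omega
  | succ fuel ih =>
    intro n h
    by_cases hn : n ∈ occ
    · have hc : PySem.Set.contains occ n = true := (PySem.Set.contains_iff occ n).mpr hn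
      rw [findFree, hc, if_pos rfl]
      have hcount : countGe occ (n + 1) < fuel := by
        have := countGe_lt_of_mem hn (by omega : n < n + 1)
        omega
      have hf := ih (n + 1) hcount
      have hle : n + 1 ≤ findFree fuel occ (n + 1) := hf.1
      refine ⟨by omega, hf.2.1, ?_⟩
      intro s hs1 hs2
      by_cases hsn : s = n
      · subst hsn; exact hn
      · have hs1' : n + 1 ≤ s := by omega
        exact hf.2.2 s hs1' hs2
    · have hc : PySem.Set.contains occ n = false := by
        cases hb : PySem.Set.contains occ n
        · rfl
        · exact absurd ((PySem.Set.contains_iff occ n).mp hb) hn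
      have hred : findFree (fuel + 1) occ n = n := by
        rw [findFree, hc]; simp
      rw [hred]
      exact ⟨le_refl n, hn, by intro s h1 h2; omega⟩

lemma chase_all {room : PySem.Dict Int Int} {occ : List Int} (hinv : SimInv room occ) :
    ∀ (fuel : Nat) (n : Int) (visit : List Int),
    countGe room.keys n < fuel →
    n ∈ visit →
    (∀ v ∈ visit, v ≤ n ∧ (∀ s, v ≤ s → s < n → s ∈ occ) ∧ (room.contains v = true ∨ v = n)) →
    FreeAt occ n (chaseA fuel room n visit).1 ∧
    (chaseA fuel room n visit).1 ∈ (chaseA fuel room n visit).2 ∧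
    (∀ v ∈ (chaseA fuel room n visit).2,
      v ≤ (chaseA fuel room n visit).1 ∧
      (∀ s, v ≤ s → s < (chaseA fuel room n visit).1 → s ∈ occ) ∧
      (room.contains v = true ∨ v = (chaseA fuel room n visit).1)) := by
  intro fuel
  induction fuel with
  | zero => intro n visit h; omega
  | succ fuel ih =>
    intro n visit hcount hmem hvisit
    cases hget : room.get? n with
    | none =>
      have hres : chaseA (fuel + 1) room n visit = (n, visit) := by
        rw [chaseA, hget]
      rw [hres]
      have hnocc : n ∉ occ := by
        intro hocc
        have hcontains := (hinv.1 n).mpr hocc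
        rw [PySem.Dict.contains_eq_isSome_get?, hget] at hcontains
        simp at hcontains
      exact ⟨⟨le_refl n, hnocc, by intro s h1 h2; omega⟩, hmem, hvisit⟩
    | some m =>
      have hres : chaseA (fuel + 1) room n visit = chaseA fuel room m (visit ++ [m]) := by
        rw [chaseA, hget]
      rw [hres]
      have hcn : room.contains n = true := by
        rw [PySem.Dict.contains_eq_isSome_get?, hget]; rfl
      have hkeys : n ∈ room.keys := by
        by_contra hk
        rw [← PySem.Dict.get?_eq_none_iff_not_mem_keys] at hk
        rw [hk] at hget; simp at hget
      have hnm := hinv.2 n m hget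
      have hcount' : countGe room.keys m < fuel := by
        have := countGe_lt_of_mem hkeys hnm.1
        omega
      have hvisit' : ∀ v ∈ visit ++ [m],
          v ≤ m ∧ (∀ s, v ≤ s → s < m → s ∈ occ) ∧ (room.contains v = true ∨ v = m) := by
        intro v hv
        rcases List.mem_append.mp hv with hv | hv
        · have hold := hvisit v hv
          have hvn : v ≤ n := hold.1
          refine ⟨by omega, ?_, ?_⟩
          · intro s h1 h2
            by_cases hs : s < n
            · exact hold.2.1 s h1 hs
            · exact hnm.2 s (by omega) h2
          · rcases hold.2.2 with hc | he
            · exact Or.inl hc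
            · exact Or.inl (he ▸ hcn)
        · have hvm : v = m := by simpa using hv
          exact ⟨le_of_eq hvm, by intro s h1 h2; omega, Or.inr hvm⟩
      obtain ⟨hfree, hmem', hall⟩ := ih m (visit ++ [m]) hcount' (by simp) hvisit'
      have hnm1 : n < m := hnm.1
      have hmr : m ≤ (chaseA fuel room m (visit ++ [m])).1 := hfree.1
      refine ⟨⟨by omega, hfree.2.1, ?_⟩, hmem', hall⟩
      intro s h1 h2
      by_cases hs : s < m
      · exact hnm.2 s h1 hs
      · exact hfree.2.2 s (by omega) h2

lemma get?_foldl_insert_const (l : List Int) (d : PySem.Dict Int Int) (c v : Int) :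
    (l.foldl (fun r x => r.insert x c) d).get? v = if v ∈ l then some c else d.get? v := by
  induction l generalizing d with
  | nil => simp
  | cons x xs ih =>
    rw [List.foldl_cons, ih]
    by_cases hx : v ∈ xs
    · simp [hx]
    · simp only [hx, if_false]
      rw [PySem.Dict.get?_insert]
      by_cases hvx : v = x
      · simp [hvx]
      · simp [hvx, hx]

lemma step_main {room : PySem.Dict Int Int} {occ : PySem.Set Int} (hinv : SimInv room occ)
    (ans : List Int) (number : Int) :
    (stepA (ans, room) number).1 = (stepB (ans, occ) number).1 ∧
    SimInv (stepA (ans, room) number).2 (stepB (ans, occ) number).2 := by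
  have hkeyslen : room.keys.length = room.size := by
    simp [PySem.Dict.keys, PySem.Dict.size]
  have hcountA : countGe room.keys number < room.size + 1 := by
    have := countGe_le_length room.keys number
    omega
  have hchase := chase_all hinv (room.size + 1) number [number] hcountA (by simp)
    (by intro v hv
        have : v = number := by simpa using hv
        subst this
        exact ⟨le_refl v, by intro s h1 h2; omega, Or.inr rfl⟩)
  have hcountB : countGe occ number < occ.length + 1 := by
    have := countGe_le_length occ number
    omega
  have hfind := findFree_free (occ.length + 1) number hcountB
  set p := chaseA (room.size + 1) room number [number] with hp
  set rB := findFree (occ.length + 1) occ number with hr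
  have heq : p.1 = rB := freeAt_unique hchase.1 hfind
  constructor
  · show ans ++ [p.1] = ans ++ [rB]
    rw [heq]
  · show SimInv (p.2.foldl (fun r v => r.insert v (p.1 + 1)) room) (PySem.Set.add occ rB)
    constructor
    · intro v
      rw [PySem.Dict.contains_eq_isSome_get?, get?_foldl_insert_const, PySem.Set.mem_add]
      by_cases hv : v ∈ p.2
      · rw [if_pos hv]
        have hprop := (hchase.2.2 v hv).2.2
        simp only [Option.isSome_some, true_iff]
        rcases hprop with hc | he
        · exact Or.inl ((hinv.1 v).mp hc)
        · exact Or.inr (he.trans heq)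
      · rw [if_neg hv]
        rw [← PySem.Dict.contains_eq_isSome_get?]
        constructor
        · intro hc; exact Or.inl ((hinv.1 v).mp hc)
        · intro hmem
          rcases hmem with hmem | hmem
          · exact (hinv.1 v).mpr hmem
          · exfalso
            apply hv
            rw [hmem, ← heq]
            exact hchase.2.1
    · intro v m hget
      rw [get?_foldl_insert_const] at hget
      by_cases hv : v ∈ p.2
      · rw [if_pos hv] at hget
        have hm : m = p.1 + 1 := (Option.some.injEq _ _).mp hget.symm
        have hprop := hchase.2.2 v hv
        refine ⟨by omega, ?_⟩
        intro s h1 h2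
        rw [PySem.Set.mem_add]
        by_cases hs : s < p.1
        · exact Or.inl (hprop.2.1 s h1 hs)
        · right
          rw [← heq]; omega
      · rw [if_neg hv] at hget
        have hold := hinv.2 v m hget
        refine ⟨hold.1, ?_⟩
        intro s h1 h2
        rw [PySem.Set.mem_add]
        exact Or.inl (hold.2 s h1 h2)

lemma main_fold : ∀ (rooms ans : List Int) (room : PySem.Dict Int Int) (occ : PySem.Set Int),
    SimInv room occ →
    (rooms.foldl stepA (ans, room)).1 = (rooms.foldl stepB (ans, occ)).1 := by
  intro rooms
  induction rooms with
  | nil => intro ans room occ _; rfl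
  | cons number rest ih =>
    intro ans room occ hinv
    rw [List.foldl_cons, List.foldl_cons]
    have hstep := step_main hinv ans number
    have hA : stepA (ans, room) number = ((stepA (ans, room) number).1, (stepA (ans, room) number).2) := rfl
    have hB : stepB (ans, occ) number = ((stepB (ans, occ) number).1, (stepB (ans, occ) number).2) := rfl
    rw [hA, hB, hstep.1]
    exact ih _ _ _ hstep.2

lemma inv_empty : SimInv PySem.Dict.empty PySem.Set.empty := by
  constructor
  · intro v
    simp [PySem.Dict.contains_empty, PySem.Set.empty]
  · intro v m hget
    rw [PySem.Dict.get?_empty] at hget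
    simp at hget

-- ===== VERDICT (by name: the statement is the Claim_ definition above) =====
theorem solution_spec : Claim_equal_solution := by
  intro k room_number _
  show solution k room_number = solution_alt k room_number
  unfold solution solution_alt
  exact main_fold room_number [] PySem.Dict.empty PySem.Set.empty inv_empty
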